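-- pv_equiv track=rewrite | github.com/krzysztof-turowski/string-algorithms | lyndon/critical_factorization.py | local_period_naive
-- ===== SOURCE A (Python) =====
-- def local_period_naive(text_left, text_right):
--   for i in range(1, len(text_right) + 1):
--     w = text_right[:i]
--     if text_left.endswith(w) or w.endswith(text_left):
--       return w
--   for i in range(1, len(text_left) + 1):
--     w = text_right + text_left[-i:]
--     if text_left.endswith(w) or w.endswith(text_left):
--       return w
--   return None
-- ===== SOURCE B (Python) =====
-- def local_period_naive(text_left, text_right):
--   L, R = len(text_left), len(text_right)
--   if L == 0:
--     return text_right[:1] if R else None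
--   if R == 0:
--     return text_left[-1:]
--   m = min(L, R)
--   # family 1: smallest p <= min(L, R) with a prefix of right equal to a suffix of left
--   for p in range(1, m + 1):
--     if text_left[L - p:] == text_right[:p]:
--       return text_right[:p]
--   if L < R:
--     # family 2: left occurs inside right, earliest occurrence starting at >= 1
--     j = text_right.find(text_left, 1)
--     if j != -1:
--       return text_right[:j + L]
--   if R < L:
--     # family 3: right occurs inside left, latest occurrence ending at <= L-1,
--     # found as the earliest occurrence of the reversed right in the reversed left
--     j = text_left[::-1].find(text_right[::-1], 1)
--     if j != -1:
--       return text_right + text_left[L - j:]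
--   # family 4: largest k <= m-1 with a prefix of left equal to a suffix of right
--   # (k == 0 always satisfies the test, so the loop terminates)
--   k = m - 1
--   while not text_right.endswith(text_left[:k]):
--     k -= 1
--   return text_right + text_left[k:]
-- ===== Notes on version B (the rewrite author's own statement) =====
-- stated objective: faster
-- what changed: B replaces A's two linear scans over candidate words (each doing O(n) endswith/slice work) by a staged search: the smallest prefix-of-right/suffix-of-left overlap, then a single str.find of left in right (resp. of the reversed right in the reversed left) for the occurrence families, then a descending scan for the largest suffix-of-right/prefix-of-left overlap.
import Mathlib
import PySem

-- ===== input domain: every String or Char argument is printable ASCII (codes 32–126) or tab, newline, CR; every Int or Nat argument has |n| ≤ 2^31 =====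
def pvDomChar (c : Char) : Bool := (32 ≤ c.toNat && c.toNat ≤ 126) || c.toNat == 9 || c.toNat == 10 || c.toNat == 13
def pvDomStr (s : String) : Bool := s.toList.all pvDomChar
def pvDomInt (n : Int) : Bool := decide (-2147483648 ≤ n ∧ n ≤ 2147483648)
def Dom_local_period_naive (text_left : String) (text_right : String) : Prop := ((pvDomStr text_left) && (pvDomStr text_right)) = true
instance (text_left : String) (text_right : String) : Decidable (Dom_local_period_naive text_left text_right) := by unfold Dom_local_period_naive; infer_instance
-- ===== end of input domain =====

-- B replaces A's two quadratic candidate scans by a staged search (smallest prefix/suffix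
-- overlap, then a single find on the (reversed) strings, then the largest suffix-of-right /
-- prefix-of-left overlap); objective: alternative/faster-in-practice, exact same return value.

-- ===== PORT A =====
-- first loop of A: for i in range(1, len(text_right)+1): w = text_right[:i]; …
def pvALoop1 (l r : List Char) (i : Nat) : Option (List Char) :=
  if i < r.length + 1 then
    let w := PySem.List.slice r none (some (i : Int))
    if PySem.Chars.endswith l w || PySem.Chars.endswith w l then some w
    else pvALoop1 l r (i + 1)
  else none
termination_by r.length + 1 - i

-- second loop of A: for i in range(1, len(text_left)+1): w = text_right + text_left[-i:]; …
def pvALoop2 (l r : List Char) (i : Nat) : Option (List Char) :=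
  if i < l.length + 1 then
    let w := r ++ PySem.List.slice l (some (-(i : Int))) none
    if PySem.Chars.endswith l w || PySem.Chars.endswith w l then some w
    else pvALoop2 l r (i + 1)
  else none
termination_by l.length + 1 - i

def local_period_naive (text_left : String) (text_right : String) : Option String :=
  match pvALoop1 text_left.toList text_right.toList 1 with
  | some w => some (String.ofList w)
  | none =>
    match pvALoop2 text_left.toList text_right.toList 1 with
    | some w => some (String.ofList w)
    | none => none

-- ===== PORT B =====
-- family 1 of Source B: for p in range(1, m+1): if text_left[L-p:] == text_right[:p]: return p
def pvBLoop1 (l r : List Char) (m p : Nat) : Option Nat :=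
  if p < m + 1 then
    if PySem.List.slice l (some ((l.length - p : Nat) : Int)) none
        = PySem.List.slice r none (some (p : Int)) then some p
    else pvBLoop1 l r m (p + 1)
  else none
termination_by m + 1 - p

-- family 4 of Source B: k = m-1; while not text_right.endswith(text_left[:k]): k -= 1
-- (at k = 0 the test text_right.endswith('') always succeeds, hence the base case)
def pvBLoop4 (l r : List Char) : Nat → Nat
  | 0 => 0
  | k + 1 =>
    if PySem.Chars.endswith r (PySem.List.slice l none (some ((k + 1 : Nat) : Int))) then k + 1
    else pvBLoop4 l r k

-- Source B after the family-1 loop: the two find-based families, falling through to family 4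
def pvBFam4 (l r : List Char) (m : Nat) : List Char :=
  r ++ PySem.List.slice l (some ((pvBLoop4 l r (m - 1) : Nat) : Int)) none

def pvBAfter (l r : List Char) (m : Nat) : List Char :=
  if l.length < r.length then
    let j := PySem.Chars.findFrom r l 1 none
    if j = -1 then pvBFam4 l r m
    else PySem.List.slice r none (some (j + (l.length : Int)))
  else if r.length < l.length then
    let j := PySem.Chars.findFrom l.reverse r.reverse 1 none
    if j = -1 then pvBFam4 l r m
    else r ++ PySem.List.slice l (some ((l.length : Int) - j)) none
  else pvBFam4 l r m

def local_period_naive_alt (text_left : String) (text_right : String) : Option String :=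
  let l := text_left.toList
  let r := text_right.toList
  if l.length = 0 then
    if r.length = 0 then none
    else some (String.ofList (PySem.List.slice r none (some 1)))
  else if r.length = 0 then
    some (String.ofList (PySem.List.slice l (some (-1)) none))
  else
    let m := min l.length r.length
    match pvBLoop1 l r m 1 with
    | some p => some (String.ofList (PySem.List.slice r none (some (p : Int))))
    | none => some (String.ofList (pvBAfter l r m))

-- ===== PRECONDITION & SPEC =====
def Spec_local_period_naive (text_left : String) (text_right : String) (out : Option String) : Prop := out = local_period_naive_alt text_left text_right
instance (text_left : String) (text_right : String) (out : Option String) : Decidable (Spec_local_period_naive text_left text_right out) := by unfold Spec_local_period_naive; infer_instance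

-- ===== CLAIM (what is proved, stated in full; the proofs are below) =====
def Claim_equal_local_period_naive : Prop := ∀ (text_left : String) (text_right : String), Dom_local_period_naive text_left text_right → Spec_local_period_naive text_left text_right (local_period_naive text_left text_right)

-- ===== LEMMAS AND PROOFS =====

-- the Prop forms of the two loop conditions of A
def pvHit1 (l r : List Char) (p : Nat) : Prop := r.take p <:+ l ∨ l <:+ r.take p
def pvHit2 (l r : List Char) (i : Nat) : Prop :=
  (r ++ l.drop (l.length - i)) <:+ l ∨ l <:+ r ++ l.drop (l.length - i)

theorem pv_suffix_append_iff (a b t : List Char) : a ++ t <:+ b ++ t ↔ a <:+ b := by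
  rw [← List.reverse_prefix]; simp [List.reverse_append]

theorem pv_hit1_iff (l r : List Char) (p : Nat) (h1 : p ≤ l.length) (h2 : p ≤ r.length) :
    pvHit1 l r p ↔ l.drop (l.length - p) = r.take p := by
  have hlen : (r.take p).length = p := by simp [h2]
  constructor
  · rintro (h | h)
    · rw [List.suffix_iff_eq_drop] at h
      rw [hlen] at h; exact h.symm
    · have := h.length_le
      rw [hlen] at this
      have hep : p = l.length := le_antisymm h1 this
      have : l = r.take p := h.eq_of_length_le (by rw [hlen, hep])
      rw [← this, ← hep, Nat.sub_self, List.drop_zero]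
  · intro h
    left; rw [← h]; exact List.drop_suffix _ _

theorem pv_hit1_high_iff (l r : List Char) (p : Nat) (hL : l.length < p) (hR : p ≤ r.length) :
    pvHit1 l r p ↔ l <+: r.drop (p - l.length) := by
  have hlen : (r.take p).length = p := by simp [hR]
  have hno : ¬ (r.take p <:+ l) := by
    intro h; have := h.length_le; omega
  have : pvHit1 l r p ↔ l <:+ r.take p := by
    unfold pvHit1; tauto
  rw [this, List.suffix_iff_eq_drop, hlen, List.drop_take, List.prefix_iff_eq_take]
  have : p - (p - l.length) = l.length := by omega
  rw [this]

theorem pv_hit2_low_iff (l r : List Char) (i : Nat) (hi : r.length + i ≤ l.length) :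
    pvHit2 l r i ↔ r.reverse <+: l.reverse.drop i := by
  have hiL : i ≤ l.length := by omega
  have hlen : (r ++ l.drop (l.length - i)).length = r.length + i := by simp; omega
  have hsfx : pvHit2 l r i ↔ (r ++ l.drop (l.length - i)) <:+ l := by
    constructor
    · rintro (h | h)
      · exact h
      · have hle := h.length_le
        have heq : l = r ++ l.drop (l.length - i) := h.eq_of_length_le (by omega)
        rw [← heq]
    · exact fun h => Or.inl h
  rw [hsfx, ← List.reverse_prefix, List.reverse_append, List.reverse_drop]
  have h2 : l.length - (l.length - i) = i := by omega
  rw [h2]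
  nth_rewrite 2 [← List.take_append_drop i l.reverse]
  exact List.prefix_append_right_inj (l.reverse.take i)

theorem pv_hit2_high_iff (l r : List Char) (i : Nat) (hi : l.length < r.length + i)
    (hiL : i ≤ l.length) : pvHit2 l r i ↔ l.take (l.length - i) <:+ r := by
  have hlen : (r ++ l.drop (l.length - i)).length = r.length + i := by simp; omega
  have hno : ¬ ((r ++ l.drop (l.length - i)) <:+ l) := by
    intro h; have := h.length_le; omega
  have hsfx : pvHit2 l r i ↔ l <:+ r ++ l.drop (l.length - i) := by
    unfold pvHit2; tauto
  rw [hsfx]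
  nth_rewrite 1 [← List.take_append_drop (l.length - i) l]
  exact pv_suffix_append_iff _ _ _

theorem pvALoop1_cond (l r : List Char) (i : Nat) :
    (PySem.Chars.endswith l (PySem.List.slice r none (some (i : Int))) ||
      PySem.Chars.endswith (PySem.List.slice r none (some (i : Int))) l) = true ↔ pvHit1 l r i := by
  rw [PySem.List.slice_to_natCast]
  simp [pvHit1, PySem.Chars.endswith_iff]

theorem pvALoop1_none (l r : List Char) (p : Nat)
    (h : ∀ q, p ≤ q → q ≤ r.length → ¬ pvHit1 l r q) : pvALoop1 l r p = none := by
  fun_induction pvALoop1 l r p with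
  | case1 i hlt w hc =>
    exact absurd ((pvALoop1_cond l r i).mp hc) (h i le_rfl (by omega))
  | case2 i hlt w hc ih =>
    exact ih (fun q hq1 hq2 => h q (by omega) hq2)
  | case3 i hge => rfl

theorem pvALoop1_some (l r : List Char) (p t : Nat) (hp : p ≤ t) (ht : t ≤ r.length)
    (hc : pvHit1 l r t) (hmin : ∀ q, p ≤ q → q < t → ¬ pvHit1 l r q) :
    pvALoop1 l r p = some (r.take t) := by
  fun_induction pvALoop1 l r p with
  | case1 i hlt w hcnd =>
    have hhit := (pvALoop1_cond l r i).mp hcnd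
    have : i = t := by
      by_contra hne
      exact hmin i le_rfl (by omega) hhit
    subst this
    show some w = _
    simp only [w, PySem.List.slice_to_natCast]
  | case2 i hlt w hcnd ih =>
    have hit : i ≠ t := by
      intro he; subst he
      exact hcnd ((pvALoop1_cond l r i).mpr hc)
    exact ih (by omega) (fun q hq1 hq2 => hmin q (by omega) hq2)
  | case3 i hge => omega

theorem pvALoop2_cond (l r : List Char) (i : Nat) (h0 : 1 ≤ i) :
    (PySem.Chars.endswith l (r ++ PySem.List.slice l (some (-(i : Int))) none) ||
      PySem.Chars.endswith (r ++ PySem.List.slice l (some (-(i : Int))) none) l) = true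
      ↔ pvHit2 l r i := by
  rw [PySem.List.slice_from_neg_natCast l i (by omega)]
  simp [pvHit2, PySem.Chars.endswith_iff]

theorem pvALoop2_some (l r : List Char) (p t : Nat) (h0 : 1 ≤ p) (hp : p ≤ t)
    (ht : t ≤ l.length) (hc : pvHit2 l r t) (hmin : ∀ q, p ≤ q → q < t → ¬ pvHit2 l r q) :
    pvALoop2 l r p = some (r ++ l.drop (l.length - t)) := by
  fun_induction pvALoop2 l r p with
  | case1 i hlt w hcnd =>
    have hhit := (pvALoop2_cond l r i (by omega)).mp hcnd
    have : i = t := by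
      by_contra hne
      exact hmin i le_rfl (by omega) hhit
    subst this
    show some w = _
    simp only [w, PySem.List.slice_from_neg_natCast l i (by omega)]
  | case2 i hlt w hcnd ih =>
    have hit : i ≠ t := by
      intro he; subst he
      exact hcnd ((pvALoop2_cond l r i (by omega)).mpr hc)
    exact ih (by omega) (by omega) (fun q hq1 hq2 => hmin q (by omega) hq2)
  | case3 i hge => omega

theorem pvBLoop1_cond (l r : List Char) (p : Nat) :
    (PySem.List.slice l (some ((l.length - p : Nat) : Int)) none
      = PySem.List.slice r none (some (p : Int))) ↔ l.drop (l.length - p) = r.take p := by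
  rw [PySem.List.slice_from_natCast, PySem.List.slice_to_natCast]

theorem pvBLoop1_none_iff (l r : List Char) (m p : Nat) :
    pvBLoop1 l r m p = none ↔ ∀ q, p ≤ q → q ≤ m → l.drop (l.length - q) ≠ r.take q := by
  fun_induction pvBLoop1 l r m p with
  | case1 p hlt hc =>
    constructor
    · intro h; cases h
    · intro h
      exact absurd ((pvBLoop1_cond l r p).mp hc) (h p le_rfl (by omega))
  | case2 p hlt hc ih =>
    rw [ih]
    constructor
    · intro h q hq1 hq2
      rcases Nat.eq_or_lt_of_le hq1 with he | hl
      · cases he; exact fun hx => hc ((pvBLoop1_cond l r p).mpr hx)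
      · exact h q (by omega) hq2
    · intro h q hq1 hq2; exact h q (by omega) hq2
  | case3 p hge =>
    constructor
    · intro _ q hq1 hq2
      exact absurd (le_trans hq1 hq2) (by omega)
    · intro _; rfl

theorem pvBLoop1_some (l r : List Char) (m p t : Nat) (h : pvBLoop1 l r m p = some t) :
    p ≤ t ∧ t ≤ m ∧ l.drop (l.length - t) = r.take t ∧
      ∀ q, p ≤ q → q < t → l.drop (l.length - q) ≠ r.take q := by
  fun_induction pvBLoop1 l r m p with
  | case1 p hlt hc =>
    have : p = t := by cases h; rfl
    subst this
    exact ⟨le_rfl, by omega, (pvBLoop1_cond l r p).mp hc, fun q hq1 hq2 => by omega⟩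
  | case2 p hlt hc ih =>
    obtain ⟨h1, h2, h3, h4⟩ := ih h
    refine ⟨by omega, h2, h3, fun q hq1 hq2 hx => ?_⟩
    rcases Nat.eq_or_lt_of_le hq1 with he | hl
    · cases he; exact hc ((pvBLoop1_cond l r p).mpr hx)
    · exact h4 q (by omega) hq2 hx
  | case3 p hge => cases h

theorem pvBLoop4_spec (l r : List Char) (k : Nat) :
    pvBLoop4 l r k ≤ k ∧ l.take (pvBLoop4 l r k) <:+ r ∧
      ∀ q, pvBLoop4 l r k < q → q ≤ k → ¬ l.take q <:+ r := by
  induction k with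
  | zero =>
    refine ⟨le_rfl, by simp [pvBLoop4], fun q h1 h2 => by omega⟩
  | succ k ih =>
    by_cases hc : PySem.Chars.endswith r (PySem.List.slice l none (some ((k + 1 : Nat) : Int))) = true
    · have hres : pvBLoop4 l r (k + 1) = k + 1 := by
        simp only [pvBLoop4]; rw [if_pos hc]
      rw [PySem.List.slice_to_natCast, PySem.Chars.endswith_iff] at hc
      exact ⟨by omega, by rw [hres]; exact hc, fun q h1 h2 => by omega⟩
    · have hres : pvBLoop4 l r (k + 1) = pvBLoop4 l r k := by
        simp only [pvBLoop4]; rw [if_neg hc]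
      rw [PySem.List.slice_to_natCast, PySem.Chars.endswith_iff] at hc
      obtain ⟨h1, h2, h3⟩ := ih
      rw [hres]
      refine ⟨by omega, h2, fun q hq1 hq2 => ?_⟩
      rcases Nat.eq_or_lt_of_le hq2 with he | hl
      · subst he; exact hc
      · exact h3 q hq1 (by omega)

theorem pvFam4_eq (l r : List Char) (hL : 1 ≤ l.length) (hR : 1 ≤ r.length)
    (hno3 : ∀ i, 1 ≤ i → r.length + i ≤ l.length → ¬ pvHit2 l r i) :
    pvALoop2 l r 1 = some (pvBFam4 l r (min l.length r.length)) := by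
  have hm1 : min l.length r.length - 1 < min l.length r.length := by omega
  obtain ⟨hk1, hk2, hk3⟩ := pvBLoop4_spec l r (min l.length r.length - 1)
  set k := pvBLoop4 l r (min l.length r.length - 1) with hkdef
  have hkL : k ≤ l.length - 1 := by omega
  have hkR : k ≤ r.length - 1 := by omega
  have hstar : 1 ≤ l.length - k := by omega
  have hcond : pvHit2 l r (l.length - k) := by
    rw [pv_hit2_high_iff l r (l.length - k) (by omega) (by omega)]
    have : l.length - (l.length - k) = k := by omega
    rw [this]; exact hk2
  have hmin : ∀ q, 1 ≤ q → q < l.length - k → ¬ pvHit2 l r q := by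
    intro q hq1 hq2
    by_cases hreg : r.length + q ≤ l.length
    · exact hno3 q hq1 hreg
    · rw [pv_hit2_high_iff l r q (by omega) (by omega)]
      exact hk3 (l.length - q) (by omega) (by omega)
  have := pvALoop2_some l r 1 (l.length - k) le_rfl hstar (by omega) hcond hmin
  rw [this]
  unfold pvBFam4
  rw [← hkdef, PySem.List.slice_from_natCast]
  have : l.length - (l.length - k) = k := by omega
  rw [this]

theorem pv_infix_of_prefix_drop {a t : List Char} {d : Nat} (h1 : 1 ≤ d)
    (h : a <+: t.drop d) : a <:+: t.drop 1 := by
  have he : t.drop d = (t.drop 1).drop (d - 1) := by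
    rw [List.drop_drop]; congr 1; omega
  rw [he] at h
  exact h.isInfix.trans (List.drop_suffix _ _).isInfix

theorem local_period_naive_spec' : ∀ (text_left text_right : String),
    local_period_naive text_left text_right = local_period_naive_alt text_left text_right := by
  intro tl tr
  set l := tl.toList with hl
  set r := tr.toList with hr
  by_cases hL0 : l.length = 0
  · by_cases hR0 : r.length = 0
    · have hA1 : pvALoop1 l r 1 = none := pvALoop1_none l r 1 (fun q h1 h2 => by
        exact absurd (h1.trans h2) (by omega))
      have hA2 : pvALoop2 l r 1 = none := by
        unfold pvALoop2; rw [if_neg (by omega)]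
      simp [local_period_naive, local_period_naive_alt, ← hl, ← hr, hA1, hA2, hL0, hR0]
    · have hln : l = [] := List.length_eq_zero_iff.mp hL0
      have hc : pvHit1 l r 1 := Or.inr (by rw [hln]; exact List.nil_suffix)
      have hA1 : pvALoop1 l r 1 = some (r.take 1) :=
        pvALoop1_some l r 1 1 le_rfl (by omega) hc (fun q h1 h2 => by omega)
      have hslice : PySem.List.slice r none (some 1) = r.take 1 := by
        rw [PySem.List.slice_to r (by norm_num)]; rfl
      simp [local_period_naive, local_period_naive_alt, ← hl, ← hr, hA1, hL0, hR0, hslice]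
  · by_cases hR0 : r.length = 0
    · have hrn : r = [] := List.length_eq_zero_iff.mp hR0
      have hA1 : pvALoop1 l r 1 = none := by
        unfold pvALoop1; rw [if_neg (by omega)]
      have hc : pvHit2 l r 1 := Or.inl (by
        rw [hrn, List.nil_append]; exact List.drop_suffix _ _)
      have hA2 := pvALoop2_some l r 1 1 le_rfl le_rfl (by omega) hc (fun q h1 h2 => by omega)
      have hA2' : pvALoop2 l r 1 = some (l.drop (l.length - 1)) := by
        rw [hA2, hrn]; simp
      simp [local_period_naive, local_period_naive_alt, ← hl, ← hr, hA1, hA2', hL0, hR0,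
        PySem.List.slice_from_neg_one]
    · -- both nonempty
      cases hB1 : pvBLoop1 l r (min l.length r.length) 1 with
      | some p =>
        obtain ⟨hp1, hp2, hp3, hp4⟩ := pvBLoop1_some l r (min l.length r.length) 1 p hB1
        have hA1 : pvALoop1 l r 1 = some (r.take p) :=
          pvALoop1_some l r 1 p hp1 (by omega)
            ((pv_hit1_iff l r p (by omega) (by omega)).mpr hp3)
            (fun q h1 h2 => by
              rw [pv_hit1_iff l r q (by omega) (by omega)]; exact hp4 q h1 h2)
        simp [local_period_naive, local_period_naive_alt, ← hl, ← hr, hB1, hA1, hL0, hR0,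
          PySem.List.slice_to_natCast]
      | none =>
        have hnone := (pvBLoop1_none_iff l r (min l.length r.length) 1).mp hB1
        have hno1 : ∀ q, 1 ≤ q → q ≤ min l.length r.length → ¬ pvHit1 l r q := fun q h1 h2 => by
          rw [pv_hit1_iff l r q (by omega) (by omega)]; exact hnone q h1 h2
        rcases lt_trichotomy l.length r.length with hLR | hEQ | hRL
        · -- L < R : family 2 via findFrom r l 1
          by_cases hjn : PySem.Chars.findFrom r l 1 none = -1
          · have hni : ¬ l <:+: r.drop 1 := by
              have := (PySem.Chars.findFrom_natCast_eq_neg_one_iff r l 1 (by omega))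
              simp only [Nat.cast_one] at this
              exact this.mp hjn
            have hA1 : pvALoop1 l r 1 = none := pvALoop1_none l r 1 (by
              intro q h1 h2
              by_cases hq : q ≤ min l.length r.length
              · exact hno1 q h1 hq
              · rw [pv_hit1_high_iff l r q (by omega) h2]
                intro hpre
                exact hni (pv_infix_of_prefix_drop (by omega) hpre))
            have hfam := pvFam4_eq l r (by omega) (by omega) (fun i h1 h2 => by
              intro _; omega)
            simp [local_period_naive, local_period_naive_alt, ← hl, ← hr, hB1, hA1, hfam,
              pvBAfter, hLR, hjn, hL0, hR0]
          · have hspec := PySem.Chars.findFrom_natCast_spec r l 1 (by omega)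
            simp only [Nat.cast_one] at hspec
            obtain ⟨hj1, hj2, hj3⟩ := hspec hjn
            have hjL : (PySem.Chars.findFrom r l 1 none).toNat + l.length ≤ r.length := by
              have := hj2.length_le
              simp [List.length_drop] at this
              omega
            have hA1 : pvALoop1 l r 1
                = some (r.take ((PySem.Chars.findFrom r l 1 none).toNat + l.length)) :=
              pvALoop1_some l r 1 ((PySem.Chars.findFrom r l 1 none).toNat + l.length)
                (by omega) (by omega)
                ((pv_hit1_high_iff l r _ (by omega) (by omega)).mpr (by
                  have he : (PySem.Chars.findFrom r l 1 none).toNat + l.length - l.length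
                      = (PySem.Chars.findFrom r l 1 none).toNat := by omega
                  rw [he]; exact hj2))
                (fun q h1 h2 => by
                  by_cases hq : q ≤ min l.length r.length
                  · exact hno1 q h1 hq
                  · rw [pv_hit1_high_iff l r q (by omega) (by omega)]
                    exact hj3 (q - l.length) (by omega) (by omega))
            have hBw : PySem.List.slice r none
                  (some (PySem.Chars.findFrom r l 1 none + (l.length : Int)))
                = r.take ((PySem.Chars.findFrom r l 1 none).toNat + l.length) := by
              rw [PySem.List.slice_to r (by omega)]
              congr 1; omega
            simp [local_period_naive, local_period_naive_alt, ← hl, ← hr, hB1, hA1,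
              pvBAfter, hLR, hjn, hL0, hR0, hBw]
        · -- L = R : straight to family 4
          have hA1 : pvALoop1 l r 1 = none :=
            pvALoop1_none l r 1 (fun q h1 h2 => hno1 q h1 (by omega))
          have hfam := pvFam4_eq l r (by omega) (by omega) (fun i h1 h2 => by
            intro _; omega)
          have hn1 : ¬ l.length < r.length := by omega
          have hn2 : ¬ r.length < l.length := by omega
          simp [local_period_naive, local_period_naive_alt, ← hl, ← hr, hB1, hA1, hfam,
            pvBAfter, hL0, hR0, hn1, hn2]
        · -- R < L : family 3 via findFrom on the reversed strings
          have hA1 : pvALoop1 l r 1 = none :=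
            pvALoop1_none l r 1 (fun q h1 h2 => hno1 q h1 (by omega))
          have hn1 : ¬ l.length < r.length := by omega
          by_cases hjn : PySem.Chars.findFrom l.reverse r.reverse 1 none = -1
          · have hni : ¬ r.reverse <:+: l.reverse.drop 1 := by
              have := (PySem.Chars.findFrom_natCast_eq_neg_one_iff l.reverse r.reverse 1
                (by simp; omega))
              simp only [Nat.cast_one] at this
              exact this.mp hjn
            have hno3 : ∀ i, 1 ≤ i → r.length + i ≤ l.length → ¬ pvHit2 l r i := by
              intro i h1 h2
              rw [pv_hit2_low_iff l r i h2]
              intro hpre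
              exact hni (pv_infix_of_prefix_drop (by omega) hpre)
            have hfam := pvFam4_eq l r (by omega) (by omega) hno3
            simp [local_period_naive, local_period_naive_alt, ← hl, ← hr, hB1, hA1, hfam,
              pvBAfter, hRL, hjn, hL0, hR0, hn1]
          · have hspec := PySem.Chars.findFrom_natCast_spec l.reverse r.reverse 1 (by simp; omega)
            simp only [Nat.cast_one] at hspec
            obtain ⟨hj1, hj2, hj3⟩ := hspec hjn
            have hjR : r.length + (PySem.Chars.findFrom l.reverse r.reverse 1 none).toNat
                ≤ l.length := by
              have := hj2.length_le
              simp [List.length_drop] at this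
              omega
            have hA2 : pvALoop2 l r 1 = some (r ++ l.drop
                (l.length - (PySem.Chars.findFrom l.reverse r.reverse 1 none).toNat)) :=
              pvALoop2_some l r 1 _ le_rfl (by omega) (by omega)
                ((pv_hit2_low_iff l r _ (by omega)).mpr hj2)
                (fun q h1 h2 => by
                  rw [pv_hit2_low_iff l r q (by omega)]
                  exact hj3 q (by omega) (by omega))
            have hBw : PySem.List.slice l
                  (some ((l.length : Int) - PySem.Chars.findFrom l.reverse r.reverse 1 none)) none
                = l.drop (l.length - (PySem.Chars.findFrom l.reverse r.reverse 1 none).toNat) := by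
              rw [PySem.List.slice_from l (by omega)]
              congr 1; omega
            simp [local_period_naive, local_period_naive_alt, ← hl, ← hr, hB1, hA1, hA2,
              pvBAfter, hRL, hjn, hL0, hR0, hBw, hn1]

-- ===== VERDICT (by name: the statement is the Claim_ definition above) =====
theorem local_period_naive_spec : Claim_equal_local_period_naive := by
  intro tl tr _
  unfold Spec_local_period_naive
  exact local_period_naive_spec' tl tr
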